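-- pv_equiv track=rewrite | github.com/GustavoDanielL/Nova-pasta | utils/formatters.py | formatar_data
-- ===== SOURCE A (Python) =====
-- def formatar_data(valor):
--     """Formata data DD/MM/AAAA automaticamente"""
--     # Remove tudo que não é número
--     numeros = ''.join(c for c in valor if c.isdigit())
--
--     if len(numeros) == 0:
--         return ""
--     elif len(numeros) <= 2:
--         return numeros
--     elif len(numeros) <= 4:
--         return f"{numeros[:2]}/{numeros[2:]}"
--     else:
--         return f"{numeros[:2]}/{numeros[2:4]}/{numeros[4:8]}"
-- ===== SOURCE B (Python) =====
-- def formatar_data(valor):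
--     """Formata data DD/MM/AAAA automaticamente"""
--     numeros = ''.join(c for c in valor if c.isdigit())
--     out = []
--     for i, c in enumerate(numeros[:8]):
--         if i in (2, 4):
--             out.append('/')
--         out.append(c)
--     return ''.join(out)
-- ===== Notes on version B (the rewrite author's own statement) =====
-- stated objective: simpler
-- what changed: Replaces A's length-based branch cascade with slicing by a single enumerate loop over the first 8 digits that inserts '/' before indices 2 and 4.
import Mathlib
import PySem

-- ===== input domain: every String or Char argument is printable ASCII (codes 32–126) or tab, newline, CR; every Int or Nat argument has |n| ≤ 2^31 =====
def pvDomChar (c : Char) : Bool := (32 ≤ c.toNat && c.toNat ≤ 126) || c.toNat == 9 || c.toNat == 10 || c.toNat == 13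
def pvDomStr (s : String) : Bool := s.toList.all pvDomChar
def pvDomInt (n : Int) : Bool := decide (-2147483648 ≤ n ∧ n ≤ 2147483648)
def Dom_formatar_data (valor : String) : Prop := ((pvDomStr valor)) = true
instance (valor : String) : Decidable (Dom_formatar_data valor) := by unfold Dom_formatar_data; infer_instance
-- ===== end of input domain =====

-- B replaces A's length-based branch cascade and slicing by one enumerate loop over
-- the first 8 digits that inserts '/' before indices 2 and 4 (objective: simpler).

-- ===== PORT A =====
def formatar_data (valor : String) : String :=
  let numeros : List Char := valor.toList.filter PySem.Chars.isdigit
  if numeros.length = 0 then ""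
  else if numeros.length ≤ 2 then String.ofList numeros
  else if numeros.length ≤ 4 then
    String.ofList (PySem.List.slice numeros none (some 2) ++ '/' ::
               PySem.List.slice numeros (some 2) none)
  else
    String.ofList (PySem.List.slice numeros none (some 2) ++ '/' ::
               PySem.List.slice numeros (some 2) (some 4) ++ '/' ::
               PySem.List.slice numeros (some 4) (some 8))

-- ===== PORT B =====
def formatar_data_alt (valor : String) : String :=
  let numeros : List Char := valor.toList.filter PySem.Chars.isdigit
  let out : List Char :=
    (PySem.List.enumerate (PySem.List.slice numeros none (some 8))).foldl
      (fun acc p => acc ++ (if p.1 = 2 ∨ p.1 = 4 then ['/'] else []) ++ [p.2]) []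
  String.ofList out

-- ===== PRECONDITION & SPEC =====
def Spec_formatar_data (valor : String) (out : String) : Prop := out = formatar_data_alt valor
instance (valor : String) (out : String) : Decidable (Spec_formatar_data valor out) := by unfold Spec_formatar_data; infer_instance

-- ===== CLAIM (what is proved, stated in full; the proofs are below) =====
def Claim_equal_formatar_data : Prop := ∀ (valor : String), Dom_formatar_data valor → Spec_formatar_data valor (formatar_data valor)

-- ===== LEMMAS AND PROOFS =====

-- core: for ANY digit list, A's branch cascade equals B's enumerate loop
theorem formatar_data_core (l : List Char) :
    (if l.length = 0 then ""
     else if l.length ≤ 2 then String.ofList l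
     else if l.length ≤ 4 then
       String.ofList (PySem.List.slice l none (some 2) ++ '/' ::
                  PySem.List.slice l (some 2) none)
     else
       String.ofList (PySem.List.slice l none (some 2) ++ '/' ::
                  PySem.List.slice l (some 2) (some 4) ++ '/' ::
                  PySem.List.slice l (some 4) (some 8)))
    = String.ofList ((PySem.List.enumerate (PySem.List.slice l none (some 8))).foldl
        (fun acc p => acc ++ (if p.1 = 2 ∨ p.1 = 4 then ['/'] else []) ++ [p.2]) []) := by
  match l with
  | [] => rfl
  | [a] => rfl
  | [a,b] => rfl
  | [a,b,c] => rfl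
  | [a,b,c,d] => rfl
  | [a,b,c,d,e] => rfl
  | [a,b,c,d,e,f] => rfl
  | [a,b,c,d,e,f,g] => rfl
  | a::b::c::d::e::f::g::h::t =>
    have h0 : ¬ ((a::b::c::d::e::f::g::h::t).length = 0) := by simp
    have h2 : ¬ ((a::b::c::d::e::f::g::h::t).length ≤ 2) := by simp
    have h4 : ¬ ((a::b::c::d::e::f::g::h::t).length ≤ 4) := by simp
    rw [if_neg h0, if_neg h2, if_neg h4]
    rw [show ((2:Int)) = ((2:Nat):Int) by norm_num,
        show ((4:Int)) = ((4:Nat):Int) by norm_num,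
        show ((8:Int)) = ((8:Nat):Int) by norm_num]
    rw [PySem.List.slice_to_natCast, PySem.List.slice_natCast,
        PySem.List.slice_natCast, PySem.List.slice_to_natCast]
    simp [PySem.List.enumerate, List.foldl]

theorem formatar_data_spec : Claim_equal_formatar_data := by
  intro valor _
  show formatar_data valor = formatar_data_alt valor
  simpa [formatar_data, formatar_data_alt] using
    formatar_data_core (valor.toList.filter PySem.Chars.isdigit)
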